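-- pv_equiv track=rewrite | github.com/Jarell-Cheong/the-pretzel-game | completion.py | twos_to_neg_twos
-- ===== SOURCE A (Python) =====
-- def twos_to_neg_twos(link):
--
--     if link[len(link) - 1] == -1:
--
--         if 2 not in link:
--             return link
--
--         link.pop(link.index(2))
--         link.pop(len(link) - 1)
--         link.insert(0, -2)
--
--         return twos_to_neg_twos(link)
--
--     return link
-- ===== SOURCE B (Python) =====
-- def twos_to_neg_twos(link):
--     # One pass: k = min(trailing -1 run, count of 2s); prepend k -2s, drop the
--     # first k 2s and the last k -1s.  (Does not mutate link, unlike A.)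
--     t = 0
--     for x in reversed(link):
--         if x != -1:
--             break
--         t += 1
--     c = link.count(2)
--     k = t if t < c else c
--     out = [-2] * k
--     remaining = k
--     for x in link[:len(link) - k]:
--         if remaining and x == 2:
--             remaining -= 1
--         else:
--             out.append(x)
--     return out
-- ===== Notes on version B (the rewrite author's own statement) =====
-- stated objective: alternative
-- what changed: A repeatedly scans and mutates the list (index, pop, insert, recurse, O(n) work per consumed -1); B makes one pass: it counts the trailing -1 run t and the number c of 2s, sets k = min(t,c), and builds the result directly as k prepended -2s plus the list with its first k 2s and last k -1s removed.
import Mathlib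
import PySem

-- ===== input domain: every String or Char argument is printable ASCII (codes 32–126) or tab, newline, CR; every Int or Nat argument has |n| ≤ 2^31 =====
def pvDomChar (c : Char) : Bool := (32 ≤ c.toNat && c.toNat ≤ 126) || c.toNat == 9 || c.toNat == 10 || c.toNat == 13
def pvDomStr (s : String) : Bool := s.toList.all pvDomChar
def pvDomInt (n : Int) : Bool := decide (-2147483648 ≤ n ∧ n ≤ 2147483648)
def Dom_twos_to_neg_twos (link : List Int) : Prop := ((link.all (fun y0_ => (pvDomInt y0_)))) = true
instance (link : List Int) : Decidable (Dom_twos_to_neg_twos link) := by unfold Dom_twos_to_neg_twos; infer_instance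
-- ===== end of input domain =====

-- B replaces A's recursive scan-pop-insert loop by a single pass (count the trailing -1 run
-- and the 2s, build the result directly); equivalence is about the RETURN value only — the
-- Python A mutates its argument in place, B does not.

-- ===== PORT A =====
-- Literal port of A; the 'none'/unreachable match arms are Python's raising paths (only the
-- empty list reaches one), excluded by Pre_.
def twos_to_neg_twos (link : List Int) : List Int :=
  match PySem.List.pyGet? link ((link.length : Int) - 1) with
  | none => []                                   -- IndexError on the empty list
  | some last =>
    if last = -1 then
      if ¬ (2 ∈ link) then link
      else
        match PySem.List.index? link 2 with
        | none => []                             -- unreachable: 2 ∈ link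
        | some i =>
          match _h1 : PySem.List.pop? link (i : Int) with
          | none => []                           -- unreachable
          | some (_, l1) =>
            match _h2 : PySem.List.pop? l1 ((l1.length : Int) - 1) with
            | none => []                         -- unreachable
            | some (_, l2) =>
              twos_to_neg_twos (PySem.List.insert l2 0 (-2))
    else link
termination_by link.length
decreasing_by
  have e1 := PySem.List.length_of_pop?_eq_some _ _h1
  have e2 := PySem.List.length_of_pop?_eq_some _ _h2
  simp only [] at e1 e2
  have e3 : (PySem.List.insert l2 0 (-2)).length = l2.length + 1 := by
    simp [PySem.List.insert_zero]
  omega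

-- ===== PORT B =====
def twos_to_neg_twos_alt (link : List Int) : List Int :=
  let t := (link.reverse.takeWhile (fun x => x == -1)).length
  let c := PySem.List.count link 2
  let k := if t < c then t else c
  let step := (link.take (link.length - k)).foldl
      (fun (p : List Int × Nat) x =>
        if p.2 ≠ 0 ∧ x = 2 then (p.1, p.2 - 1) else (p.1 ++ [x], p.2))
      (List.replicate k (-2), k)
  step.1

-- ===== PRECONDITION & SPEC =====
-- Pre_ excludes only the empty list, on which A raises IndexError.
def Pre_twos_to_neg_twos (link : List Int) : Prop := link ≠ []
instance (link : List Int) : Decidable (Pre_twos_to_neg_twos link) := by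
  unfold Pre_twos_to_neg_twos; infer_instance

def pvWitness_twos_to_neg_twos : List Int := [2, 0, 2, -1, -1]

def Spec_twos_to_neg_twos (link : List Int) (out : List Int) : Prop := out = twos_to_neg_twos_alt link
instance (link : List Int) (out : List Int) : Decidable (Spec_twos_to_neg_twos link out) := by unfold Spec_twos_to_neg_twos; infer_instance

-- ===== CLAIM (what is proved, stated in full; the proofs are below) =====
def Claim_equal_twos_to_neg_twos : Prop := ∀ (link : List Int), Dom_twos_to_neg_twos link → Pre_twos_to_neg_twos link → Spec_twos_to_neg_twos link (twos_to_neg_twos link)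

-- ===== LEMMAS AND PROOFS =====

-- remK k l : l with its first k occurrences of 2 removed (the accumulator-free reading of B's fold).
def remK : Nat → List Int → List Int
  | _, [] => []
  | k, x :: xs => if k ≠ 0 ∧ x = 2 then remK (k - 1) xs else x :: remK k xs

-- trailing run of -1s
def trail (l : List Int) : Nat := (l.reverse.takeWhile (fun x => x == -1)).length

-- maximal prefix before that run
def body (l : List Int) : List Int := (l.reverse.dropWhile (fun x => x == -1)).reverse

theorem remK_zero (l : List Int) : remK 0 l = l := by
  induction l with
  | nil => rfl
  | cons x xs ih => simp [remK, ih]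

theorem foldl_remK (l : List Int) (acc : List Int) (k : Nat) :
    (l.foldl (fun (p : List Int × Nat) x =>
        if p.2 ≠ 0 ∧ x = 2 then (p.1, p.2 - 1) else (p.1 ++ [x], p.2)) (acc, k)).1
      = acc ++ remK k l := by
  induction l generalizing acc k with
  | nil => simp [remK]
  | cons x xs ih =>
    by_cases h : k ≠ 0 ∧ x = 2
    · simp [remK, h, ih]
    · simp [List.foldl_cons, remK, h, ih]

-- B in closed form.
theorem alt_eq (l : List Int) :
    twos_to_neg_twos_alt l =
      List.replicate (min (trail l) (l.count 2)) (-2)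
        ++ remK (min (trail l) (l.count 2)) (l.take (l.length - min (trail l) (l.count 2))) := by
  unfold twos_to_neg_twos_alt trail
  simp only [PySem.List.count_eq, foldl_remK]
  have hk : (if (l.reverse.takeWhile (fun x => x == -1)).length < List.count 2 l
      then (l.reverse.takeWhile (fun x => x == -1)).length else List.count 2 l)
      = min ((l.reverse.takeWhile (fun x => x == -1)).length) (List.count 2 l) := by
    split_ifs <;> omega
  rw [hk]

theorem takeWhile_neg_ones (t : Nat) :
    List.takeWhile (fun x => x == -1) (List.replicate t (-1 : Int)) = List.replicate t (-1) := by
  induction t with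
  | zero => rfl
  | succ n ih => simp [List.replicate_succ, ih]

theorem trail_append_replicate (m : List Int) (t : Nat) :
    trail (m ++ List.replicate t (-1)) = trail m + t := by
  unfold trail
  rw [List.reverse_append, List.reverse_replicate, List.takeWhile_append]
  rw [takeWhile_neg_ones]
  simp [Nat.add_comm]

theorem trail_of_getLast (m : List Int) (h : m.getLast? ≠ some (-1)) : trail m = 0 := by
  unfold trail
  cases hrev : m.reverse with
  | nil => simp
  | cons x xs =>
    have hx : m.getLast? = some x := by rw [← List.head?_reverse, hrev]; rfl
    have : x ≠ -1 := fun he => h (he ▸ hx)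
    simp [this]

theorem trail_pos (l : List Int) (hg : l.getLast? = some (-1)) : 1 ≤ trail l := by
  unfold trail
  cases hrev : l.reverse with
  | nil =>
    rw [← List.head?_reverse, hrev] at hg
    simp at hg
  | cons x xs =>
    have hx : x = -1 := by
      rw [← List.head?_reverse, hrev] at hg
      simpa using hg
    subst hx
    simp

theorem body_decomp (l : List Int) : l = body l ++ List.replicate (trail l) (-1) := by
  unfold body trail
  have hrep : List.takeWhile (fun x => x == -1) l.reverse
      = List.replicate ((List.takeWhile (fun x => x == -1) l.reverse).length) (-1 : Int) := by
    rw [List.eq_replicate_iff]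
    exact ⟨rfl, fun b hb => by simpa using List.mem_takeWhile_imp hb⟩
  have h1 : (List.dropWhile (fun x => x == -1) l.reverse).reverse
      ++ (List.takeWhile (fun x => x == -1) l.reverse).reverse = l := by
    rw [← List.reverse_append, List.takeWhile_append_dropWhile, List.reverse_reverse]
  have h2 : (List.takeWhile (fun x => x == -1) l.reverse).reverse
      = List.replicate ((List.takeWhile (fun x => x == -1) l.reverse).length) (-1 : Int) := by
    conv_lhs => rw [hrep]
    rw [List.reverse_replicate]
  conv_lhs => rw [← h1, h2]

theorem body_getLast (l : List Int) : (body l).getLast? ≠ some (-1) := by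
  intro hcon
  have hnot := List.head?_dropWhile_not (fun x => x == -1) l.reverse
  unfold body at hcon
  rw [List.getLast?_reverse] at hcon
  rw [hcon] at hnot
  simp at hnot

theorem count_append_replicate (m : List Int) (t : Nat) :
    (m ++ List.replicate t (-1)).count 2 = m.count 2 := by
  simp [List.count_append, List.count_replicate]

theorem remK_append (k : Nat) (m r : List Int) (h : k ≤ m.count 2) :
    remK k (m ++ r) = remK k m ++ r := by
  induction m generalizing k with
  | nil =>
    simp only [List.count_nil, Nat.le_zero] at h
    simp [h, remK_zero, remK]
  | cons x xs ih =>
    by_cases hx : k ≠ 0 ∧ x = 2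
    · simp only [List.cons_append, remK, if_pos hx]
      exact ih _ (by simp [hx.2] at h ⊢; omega)
    · simp only [List.cons_append, remK, if_neg hx]
      by_cases hk : k = 0
      · subst hk; simp [remK_zero]
      · have hx2 : x ≠ 2 := fun h2 => hx ⟨hk, h2⟩
        rw [ih k (by simpa [List.count_cons, hx2] using h)]

theorem count_remK_one (m : List Int) (h : 2 ∈ m) :
    (remK 1 m).count 2 + 1 = m.count 2 := by
  induction m with
  | nil => simp at h
  | cons x xs ih =>
    by_cases hx : x = 2
    · subst hx
      simp [remK, remK_zero]
    · have h2 : 2 ∈ xs := by cases List.mem_cons.mp h with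
        | inl he => exact absurd he.symm hx
        | inr hm => exact hm
      simp only [remK, if_neg (fun hc : (1:Nat) ≠ 0 ∧ x = 2 => hx hc.2)]
      simp only [List.count_cons]
      have := ih h2
      split_ifs <;> omega

theorem length_remK_one (m : List Int) (h : 2 ∈ m) :
    (remK 1 m).length + 1 = m.length := by
  induction m with
  | nil => simp at h
  | cons x xs ih =>
    by_cases hx : x = 2
    · subst hx; simp [remK, remK_zero]
    · have h2 : 2 ∈ xs := by cases List.mem_cons.mp h with
        | inl he => exact absurd he.symm hx
        | inr hm => exact hm
      simp only [remK, if_neg (fun hc : (1:Nat) ≠ 0 ∧ x = 2 => hx hc.2), List.length_cons]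
      have := ih h2
      omega

theorem remK_remK_one (j : Nat) (m : List Int) : remK j (remK 1 m) = remK (j + 1) m := by
  induction m generalizing j with
  | nil => simp [remK]
  | cons x xs ih =>
    by_cases hx : x = 2
    · subst hx
      simp [remK, remK_zero]
    · simp only [remK, if_neg (fun hc : (1:Nat) ≠ 0 ∧ x = 2 => hx hc.2),
        if_neg (fun hc : j ≠ 0 ∧ x = 2 => hx hc.2),
        if_neg (fun hc : j + 1 ≠ 0 ∧ x = 2 => hx hc.2)]
      rw [ih]

theorem getLast?_cons_ne_nil (a : Int) (l : List Int) (h : l ≠ []) :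
    (a :: l).getLast? = l.getLast? := by
  rw [List.getLast?_cons]
  cases hl : l.getLast? with
  | none => exact absurd (List.getLast?_eq_none_iff.mp hl) h
  | some y => simp

theorem getLast_remK_one (m : List Int) (h : 2 ≤ m.count 2) :
    remK 1 m ≠ [] ∧ (remK 1 m).getLast? = m.getLast? := by
  induction m with
  | nil => simp at h
  | cons x xs ih =>
    by_cases hx : x = 2
    · subst hx
      have h1 : 1 ≤ xs.count 2 := by
        rw [List.count_cons_self] at h; omega
      have hne : xs ≠ [] := by
        intro he; subst he; simp at h1
      have hr2 : remK 1 (2 :: xs) = xs := by simp [remK, remK_zero]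
      exact ⟨by rw [hr2]; exact hne,
        by rw [hr2]; exact (getLast?_cons_ne_nil 2 xs hne).symm⟩
    · have h2 : 2 ≤ xs.count 2 := by simp [hx] at h ⊢; omega
      obtain ⟨hne, heq⟩ := ih h2
      have hxs : xs ≠ [] := by intro he; subst he; simp at h2
      have hr : remK 1 (x :: xs) = x :: remK 1 xs := by
        simp only [remK, if_neg (fun hc : (1:Nat) ≠ 0 ∧ x = 2 => hx hc.2)]
      refine ⟨by rw [hr]; simp, ?_⟩
      rw [hr, getLast?_cons_ne_nil x _ hne, heq, getLast?_cons_ne_nil x xs hxs]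

-- pop(index(2)) is the first-2 erase, i.e. remK 1.
theorem pop_index_remK (l : List Int) (h : 2 ∈ l) :
    ∃ i, PySem.List.index? l 2 = some i ∧
      PySem.List.pop? l (i : Int) = some (2, remK 1 l) := by
  induction l with
  | nil => simp at h
  | cons x xs ih =>
    by_cases hx : x = 2
    · subst hx
      refine ⟨0, PySem.List.index?_cons_self 2 xs, ?_⟩
      have : ((0 : Nat) : Int) = 0 := rfl
      rw [this, PySem.List.pop?_zero_cons]
      simp [remK, remK_zero]
    · have h2 : 2 ∈ xs := by cases List.mem_cons.mp h with
        | inl he => exact absurd he.symm hx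
        | inr hm => exact hm
      obtain ⟨i, hi, hp⟩ := ih h2
      obtain ⟨hk, hget, -⟩ := PySem.List.getElem_of_index?_eq_some hi
      refine ⟨i + 1, ?_, ?_⟩
      · rw [PySem.List.index?_cons_of_ne xs hx, hi]; rfl
      · rw [PySem.List.pop?_natCast (x :: xs) (i + 1) (by simpa using Nat.succ_lt_succ hk)]
        rw [PySem.List.pop?_natCast xs i hk] at hp
        obtain ⟨he1, he2⟩ : xs[i] = 2 ∧ xs.eraseIdx i = remK 1 xs := by
          have := Option.some.inj hp
          exact ⟨congrArg Prod.fst this, congrArg Prod.snd this⟩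
        simp only [List.getElem_cons_succ, List.eraseIdx_cons_succ, he1, he2]
        have hr : remK 1 (x :: xs) = x :: remK 1 xs := by
          simp only [remK, if_neg (fun hc : (1:Nat) ≠ 0 ∧ x = 2 => hx hc.2)]
        rw [hr]

theorem pop_concat (xs : List Int) (x : Int) :
    PySem.List.pop? (xs ++ [x]) (((xs ++ [x]).length : Int) - 1) = some (x, xs) := by
  have hlen : (xs ++ [x]).length = xs.length + 1 := by simp
  have hcast : (((xs ++ [x]).length : Int) - 1) = ((xs.length : Nat) : Int) := by
    rw [hlen]; push_cast; ring
  rw [hcast, PySem.List.pop?_natCast (xs ++ [x]) xs.length (by simp)]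
  rw [List.getElem_concat_length rfl]
  rw [List.eraseIdx_append_of_length_le le_rfl, Nat.sub_self]
  simp

theorem pyGet_last (l : List Int) (h : l ≠ []) :
    PySem.List.pyGet? l ((l.length : Int) - 1) = l.getLast? := by
  have hlen : 1 ≤ l.length := List.length_pos_iff.mpr h
  have hc : ((l.length : Int) - 1) = ((l.length - 1 : Nat) : Int) := by omega
  rw [hc, PySem.List.pyGet?_natCast, List.getLast?_eq_getElem?]

-- A returns its argument when the last element is not -1.
theorem A_last_ne (l : List Int) (x : Int) (hg : l.getLast? = some x) (hx : x ≠ -1) :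
    twos_to_neg_twos l = l := by
  have hne : l ≠ [] := by intro he; subst he; simp at hg
  rw [twos_to_neg_twos, pyGet_last l hne, hg]
  simp [hx]

-- A returns its argument when no 2 is present.
theorem A_no2 (l : List Int) (hg : l.getLast? = some (-1)) (h2 : 2 ∉ l) :
    twos_to_neg_twos l = l := by
  have hne : l ≠ [] := by intro he; subst he; simp at hg
  rw [twos_to_neg_twos, pyGet_last l hne, hg]
  simp [h2]

-- A's recursive step on a decomposed list.
theorem A_step (m : List Int) (t : Nat) (ht : 1 ≤ t) (h2 : 2 ∈ m) :
    twos_to_neg_twos (m ++ List.replicate t (-1)) =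
      twos_to_neg_twos (-2 :: (remK 1 m ++ List.replicate (t - 1) (-1))) := by
  have htsplit : List.replicate t (-1 : Int) = List.replicate (t - 1) (-1) ++ [-1] := by
    rw [← List.replicate_succ']
    congr 1
    omega
  set l := m ++ List.replicate t (-1) with hl
  have hlast : l.getLast? = some (-1) := by
    rw [hl, htsplit, ← List.append_assoc, List.getLast?_concat]
  have hne : l ≠ [] := by intro he; rw [he] at hlast; simp at hlast
  have h2l : 2 ∈ l := by rw [hl]; exact List.mem_append_left _ h2
  obtain ⟨i, hi, hp⟩ := pop_index_remK l h2l
  have hcm : 1 ≤ m.count 2 := List.one_le_count_iff.mpr h2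
  have hrem : remK 1 l = remK 1 m ++ List.replicate t (-1) := by
    rw [hl]; exact remK_append 1 m _ hcm
  have hrem' : remK 1 l = (remK 1 m ++ List.replicate (t - 1) (-1)) ++ [-1] := by
    rw [hrem, htsplit, List.append_assoc]
  rw [twos_to_neg_twos, pyGet_last l hne, hlast]
  simp only [reduceIte, h2l, not_true_eq_false, if_false, hi]
  split
  · rename_i heq; rw [hp] at heq; exact absurd heq (by simp)
  · rename_i a l1 heq
    rw [hp] at heq
    have he2 : l1 = remK 1 l := (congrArg Prod.snd (Option.some.inj heq)).symm
    subst he2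
    split
    · rename_i heq2
      rw [hrem', pop_concat] at heq2
      exact absurd heq2 (by simp)
    · rename_i b l2 heq2
      rw [hrem', pop_concat] at heq2
      have hf2 : l2 = remK 1 m ++ List.replicate (t - 1) (-1) :=
        (congrArg Prod.snd (Option.some.inj heq2)).symm
      subst hf2
      rw [PySem.List.insert_zero]

-- B's value on a decomposed list.
theorem alt_closed (m : List Int) (t : Nat) (hm : m.getLast? ≠ some (-1)) :
    twos_to_neg_twos_alt (m ++ List.replicate t (-1)) =
      List.replicate (min t (m.count 2)) (-2)
        ++ remK (min t (m.count 2)) m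
        ++ List.replicate (t - min t (m.count 2)) (-1) := by
  have htr : trail (m ++ List.replicate t (-1)) = t := by
    rw [trail_append_replicate, trail_of_getLast m hm]
    omega
  have hct := count_append_replicate m t
  rw [alt_eq, htr, hct]
  set k := min t (m.count 2) with hk
  have hkt : k ≤ t := min_le_left _ _
  have hkc : k ≤ m.count 2 := min_le_right _ _
  have hlen : (m ++ List.replicate t (-1)).length = m.length + t := by simp
  have htake : (m ++ List.replicate t (-1)).take ((m ++ List.replicate t (-1)).length - k)
      = m ++ List.replicate (t - k) (-1) := by
    rw [hlen, List.take_append]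
    congr 1
    · exact List.take_of_length_le (by omega)
    · rw [List.take_replicate]
      congr 1
      omega
  rw [htake, remK_append k m _ hkc, List.append_assoc]

theorem alt_of_no2 (l : List Int) (h2 : 2 ∉ l) : twos_to_neg_twos_alt l = l := by
  rw [alt_eq, List.count_eq_zero.mpr h2]
  simp [remK_zero]

theorem alt_of_trail_zero (l : List Int) (h : trail l = 0) : twos_to_neg_twos_alt l = l := by
  rw [alt_eq, h]
  simp [remK_zero]

theorem step_eq (m : List Int) (t : Nat) (ht1 : 1 ≤ t) (hc2 : 2 ≤ List.count 2 m)
    (hm : m.getLast? ≠ some (-1)) :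
    twos_to_neg_twos_alt (-2 :: (remK 1 m ++ List.replicate (t - 1) (-1)))
      = twos_to_neg_twos_alt (m ++ List.replicate t (-1)) := by
  obtain ⟨hrne, hrlast⟩ := getLast_remK_one m hc2
  have h2m : 2 ∈ m := List.one_le_count_iff.mp (by omega)
  have hm' : (-2 :: remK 1 m).getLast? ≠ some (-1) := by
    rw [getLast?_cons_ne_nil _ _ hrne, hrlast]; exact hm
  have hcnt' : List.count 2 (-2 :: remK 1 m) = List.count 2 m - 1 := by
    have := count_remK_one m h2m
    simp only [List.count_cons]
    split_ifs with hsp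
    · simp at hsp
    · omega
  show twos_to_neg_twos_alt ((-2 :: remK 1 m) ++ List.replicate (t - 1) (-1)) = _
  rw [alt_closed _ _ hm', alt_closed m t hm, hcnt']
  generalize hc : List.count 2 m = c
  rw [hc] at hc2
  have hmin : 1 ≤ min t c := le_min ht1 (by omega)
  have hk' : min (t - 1) (c - 1) = min t c - 1 := by
    rcases Nat.le_total t c with hto | hto
    · rw [Nat.min_eq_left hto, Nat.min_eq_left (by omega : t - 1 ≤ c - 1)]
    · rw [Nat.min_eq_right hto, Nat.min_eq_right (by omega : c - 1 ≤ t - 1)]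
  rw [hk']
  have hremk : remK (min t c - 1) (-2 :: remK 1 m) = -2 :: remK (min t c) m := by
    simp only [remK, if_neg (by simp : ¬ (min t c - 1 ≠ 0 ∧ (-2 : Int) = 2))]
    rw [remK_remK_one, Nat.sub_add_cancel hmin]
  rw [hremk]
  have harith : t - 1 - (min t c - 1) = t - min t c := by
    generalize hg : min t c = k
    rw [hg] at hmin
    omega
  rw [harith]
  obtain ⟨j, hj⟩ : ∃ j, min t c = j + 1 :=
    ⟨min t c - 1, (Nat.sub_add_cancel hmin).symm⟩
  rw [hj]
  simp [List.replicate_succ', List.append_assoc]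

theorem main_equiv : ∀ n (l : List Int), l.length ≤ n → l ≠ [] →
    twos_to_neg_twos l = twos_to_neg_twos_alt l := by
  intro n
  induction n with
  | zero =>
    intro l hlen hne
    exact absurd (List.eq_nil_of_length_eq_zero (Nat.le_zero.mp hlen)) hne
  | succ n ih =>
    intro l hlen hne
    by_cases h2 : 2 ∈ l
    · by_cases ht : trail l = 0
      · -- last element is not -1: both sides return l
        cases hx : l.getLast? with
        | none => exact absurd (List.getLast?_eq_none_iff.mp hx) hne
        | some x =>
          have hxne : x ≠ -1 := by
            intro he; subst he
            have := trail_pos l hx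
            omega
          rw [A_last_ne l x hx hxne, alt_of_trail_zero l ht]
      · -- last element is -1 and a 2 exists: one step of A, then the induction hypothesis
        have hd := body_decomp l
        have hm := body_getLast l
        set m := body l with hmdef
        set t := trail l with htdef
        have ht1 : 1 ≤ t := by omega
        have h2m : 2 ∈ m := by
          rw [hd] at h2
          cases List.mem_append.mp h2 with
          | inl h => exact h
          | inr h => exact absurd (List.eq_of_mem_replicate h) (by decide)
        have hcm : 1 ≤ m.count 2 := List.one_le_count_iff.mpr h2m
        have hstep : twos_to_neg_twos l =
            twos_to_neg_twos (-2 :: (remK 1 m ++ List.replicate (t - 1) (-1))) := by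
          conv_lhs => rw [hd]
          exact A_step m t ht1 h2m
        set l' := -2 :: (remK 1 m ++ List.replicate (t - 1) (-1)) with hl'
        have hlr := length_remK_one m h2m
        have hlenl : l.length = m.length + t := by rw [hd]; simp
        have hlenl' : l'.length = m.length + t - 1 := by
          rw [hl']; simp; omega
        have hih : twos_to_neg_twos l' = twos_to_neg_twos_alt l' := by
          refine ih l' (by omega) (by simp [hl'])
        rw [hstep, hih]
        -- it remains to show B l' = B l
        by_cases hc2 : 2 ≤ m.count 2
        · -- at least two 2s: the trailing run of l' is exactly t - 1
          rw [hl']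
          conv_rhs => rw [hd]
          exact step_eq m t ht1 hc2 hm
        · -- exactly one 2: l' contains no 2, so B l' = l', which is B l
          have hc1 : m.count 2 = 1 := by omega
          have hcnt0 : l'.count 2 = 0 := by
            have := count_remK_one m h2m
            rw [hl']
            simp only [List.count_cons, List.count_append, List.count_replicate]
            simp
            omega
          rw [alt_of_no2 l' (List.count_eq_zero.mp hcnt0)]
          conv_rhs => rw [hd, alt_closed m t hm]
          rw [hc1]
          have hk1 : min t 1 = 1 := Nat.min_eq_right ht1
          rw [hk1, hl']
          simp
    · -- no 2: both sides return l
      have hb := alt_of_no2 l h2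
      cases hx : l.getLast? with
      | none => exact absurd (List.getLast?_eq_none_iff.mp hx) hne
      | some x =>
        by_cases hx1 : x = -1
        · subst hx1; rw [A_no2 l hx h2, hb]
        · rw [A_last_ne l x hx hx1, hb]

-- ===== VERDICT (by name: the statement is the Claim_ definition above) =====
theorem twos_to_neg_twos_spec : Claim_equal_twos_to_neg_twos := by
  intro link _ hpre
  unfold Spec_twos_to_neg_twos
  exact main_equiv link.length link le_rfl hpre
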